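-- pv_equiv track=rewrite | github.com/leeminhee119/AlgorithmStudy | greedy/pgkit_gymclothes.py | solution
-- ===== SOURCE A (Python) =====
-- def solution(n, lost, reserve):
--     answer = n
--     new_reserve = [i for i in reserve if i not in lost]
--     new_reserve.sort()  # 정렬... 꼭.. 해줘야 아래 알고리즘이 그리디하게 된다
--     new_lost = [i for i in lost if i not in reserve]
--     new_lost.sort()
--     for num_lost in new_lost:
--         if num_lost - 1 in new_reserve:
--             new_reserve.remove(num_lost - 1)
--         elif num_lost + 1 in new_reserve:
--             new_reserve.remove(num_lost + 1)
--         else: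
--             answer -= 1
--     return answer
-- ===== SOURCE B (Python) =====
-- def solution(n, lost, reserve):
--     lost_set = set(lost)
--     reserve_set = set(reserve)
--     ls = sorted(x for x in lost if x not in reserve_set)
--     rs = sorted(x for x in reserve if x not in lost_set)
--     answer = n
--     j = 0
--     for l in ls:
--         while j < len(rs) and rs[j] < l - 1:
--             j += 1
--         if j < len(rs) and rs[j] <= l + 1:
--             j += 1
--         else:
--             answer -= 1
--     return answer
-- ===== Notes on version B (the rewrite author's own statement) =====
-- stated objective: faster
-- what changed: Replaces A's per-lost membership tests and list.remove on a mutable reserve list with set-based filtering plus a two-pointer merge: one forward pointer sweeps the sorted reserve list in step with the sorted lost list, matching or skipping each spare exactly once, so no inner scan or removal remains.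
import Mathlib
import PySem

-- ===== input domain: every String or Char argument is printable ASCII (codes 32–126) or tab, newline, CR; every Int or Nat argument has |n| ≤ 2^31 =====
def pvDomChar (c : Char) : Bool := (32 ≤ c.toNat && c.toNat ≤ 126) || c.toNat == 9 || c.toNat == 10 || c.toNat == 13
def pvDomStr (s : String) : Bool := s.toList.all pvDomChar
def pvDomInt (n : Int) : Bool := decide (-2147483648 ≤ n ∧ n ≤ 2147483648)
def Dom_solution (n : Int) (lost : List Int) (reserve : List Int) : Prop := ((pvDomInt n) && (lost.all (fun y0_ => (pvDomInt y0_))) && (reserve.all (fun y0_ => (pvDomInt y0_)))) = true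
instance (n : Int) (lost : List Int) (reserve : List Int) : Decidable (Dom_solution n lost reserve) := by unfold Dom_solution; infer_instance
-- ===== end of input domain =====

-- B: two-pointer merge over the two sorted filtered lists (one forward sweep, no
-- membership scans and no list.remove); faster by an asymptotic mechanism.


-- ===== PORT A =====
def solution (n : Int) (lost : List Int) (reserve : List Int) : Int :=
  let newReserve := PySem.List.sorted (reserve.filter (fun i => !lost.contains i)) (fun x => x) false
  let newLost := PySem.List.sorted (lost.filter (fun i => !reserve.contains i)) (fun x => x) false
  (newLost.foldl (fun (st : Int × List Int) l =>
      if l - 1 ∈ st.2 then (st.1, (PySem.List.remove? st.2 (l - 1)).getD st.2)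
      else if l + 1 ∈ st.2 then (st.1, (PySem.List.remove? st.2 (l + 1)).getD st.2)
      else (st.1 - 1, st.2)) (n, newReserve)).1

-- ===== PORT B =====
-- Source B's pointer j into the sorted reserve list is represented by the remaining
-- suffix of that list; the inner while loop is dropWhile on that suffix (exact).
def solution_alt (n : Int) (lost : List Int) (reserve : List Int) : Int :=
  let lostSet := PySem.Set.ofList lost
  let reserveSet := PySem.Set.ofList reserve
  let ls := PySem.List.sorted (lost.filter (fun x => !(x ∈ reserveSet : Bool))) (fun x => x) false
  let rs := PySem.List.sorted (reserve.filter (fun x => !(x ∈ lostSet : Bool))) (fun x => x) false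
  (ls.foldl (fun (st : Int × List Int) l =>
      let r := st.2.dropWhile (fun v => decide (v < l - 1))
      match r with
      | [] => (st.1 - 1, r)
      | v :: t => if v ≤ l + 1 then (st.1, t) else (st.1 - 1, r)) (n, rs)).1

-- ===== PRECONDITION & SPEC =====
def Spec_solution (n : Int) (lost : List Int) (reserve : List Int) (out : Int) : Prop := out = solution_alt n lost reserve
instance (n : Int) (lost : List Int) (reserve : List Int) (out : Int) : Decidable (Spec_solution n lost reserve out) := by unfold Spec_solution; infer_instance

-- ===== CLAIM (what is proved, stated in full; the proofs are below) =====
def Claim_equal_solution : Prop := ∀ (n : Int) (lost : List Int) (reserve : List Int), Dom_solution n lost reserve → Spec_solution n lost reserve (solution n lost reserve)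

-- ===== LEMMAS AND PROOFS =====

-- named versions of the two loop bodies (definitionally equal to the lambdas in the ports)
def stepA (st : Int × List Int) (l : Int) : Int × List Int :=
  if l - 1 ∈ st.2 then (st.1, (PySem.List.remove? st.2 (l - 1)).getD st.2)
  else if l + 1 ∈ st.2 then (st.1, (PySem.List.remove? st.2 (l + 1)).getD st.2)
  else (st.1 - 1, st.2)

def stepB (st : Int × List Int) (l : Int) : Int × List Int :=
  let r := st.2.dropWhile (fun v => decide (v < l - 1))
  match r with
  | [] => (st.1 - 1, r)
  | v :: t => if v ≤ l + 1 then (st.1, t) else (st.1 - 1, r)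

theorem dropWhile_head_not {p : Int → Bool} {xs v : _} {t : List Int}
    (h : List.dropWhile p xs = v :: t) : p v = false := by
  induction xs with
  | nil => simp at h
  | cons a as ih =>
    rw [List.dropWhile_cons] at h
    by_cases hp : p a = true
    · exact ih (by simpa [hp] using h)
    · simp [hp] at h
      rcases h with ⟨h1, _⟩
      subst h1
      simpa using hp

-- core invariant: A's remaining reserve list is S ++ RB where S holds already-passed
-- small elements (all < l - 1 for every remaining lost l) and RB is B's suffix
theorem loop_eq (L : List Int) (ans : Int) (S RB : List Int)
    (hsort : (S ++ RB).Pairwise (· ≤ ·))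
    (hS : ∀ s ∈ S, ∀ l ∈ L, s < l - 1)
    (hL : L.Pairwise (· ≤ ·))
    (hnm : ∀ l ∈ L, l ∉ S ++ RB) :
    (L.foldl stepA (ans, S ++ RB)).1 = (L.foldl stepB (ans, RB)).1 := by
  induction L generalizing ans S RB with
  | nil => rfl
  | cons l t ih =>
    rw [List.pairwise_cons] at hL
    obtain ⟨hlt, hLt⟩ := hL
    have hRB : RB = RB.takeWhile (fun v => decide (v < l - 1)) ++
        RB.dropWhile (fun v => decide (v < l - 1)) :=
      (List.takeWhile_append_dropWhile).symm
    have hDsmall : ∀ v ∈ RB.takeWhile (fun v => decide (v < l - 1)), v < l - 1 := by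
      intro v hv
      simpa using List.mem_takeWhile_imp hv
    have hSDsmall : ∀ v ∈ S ++ RB.takeWhile (fun v => decide (v < l - 1)), v < l - 1 := by
      intro v hv
      rcases List.mem_append.mp hv with h | h
      · exact hS v h l (by simp)
      · exact hDsmall v h
    have hassoc : S ++ RB = (S ++ RB.takeWhile (fun v => decide (v < l - 1))) ++
        RB.dropWhile (fun v => decide (v < l - 1)) := by
      conv_lhs => rw [hRB]
      rw [List.append_assoc]
    have hrsub : List.Sublist (RB.dropWhile (fun v => decide (v < l - 1))) RB :=
      List.dropWhile_sublist _
    have hlnotr : l ∉ RB.dropWhile (fun v => decide (v < l - 1)) := fun h =>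
      hnm l (by simp) (List.mem_append.mpr (Or.inr (hrsub.mem h)))
    -- helper to recurse with the enlarged small-set S ++ takeWhile …
    have hrec : ∀ (ans' : Int) (RB' : List Int),
        ((S ++ RB.takeWhile (fun v => decide (v < l - 1))) ++ RB').Pairwise (· ≤ ·) →
        (∀ l' ∈ t, l' ∉ (S ++ RB.takeWhile (fun v => decide (v < l - 1))) ++ RB') →
        (t.foldl stepA (ans', (S ++ RB.takeWhile (fun v => decide (v < l - 1))) ++ RB')).1 =
          (t.foldl stepB (ans', RB')).1 := by
      intro ans' RB' h1 h2
      refine ih ans' _ RB' h1 ?_ hLt h2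
      intro s hs l' hl'
      have := hSDsmall s hs
      have := hlt l' hl'
      omega
    rw [List.foldl_cons, List.foldl_cons]
    cases hrcase : RB.dropWhile (fun v => decide (v < l - 1)) with
    | nil =>
      -- nothing ≥ l-1 remains: both sides decrement
      rw [hrcase, List.append_nil] at hassoc
      have hnomem1 : l - 1 ∉ S ++ RB := by
        intro h; rw [hassoc] at h; have := hSDsmall _ h; omega
      have hnomem2 : l + 1 ∉ S ++ RB := by
        intro h; rw [hassoc] at h; have := hSDsmall _ h; omega
      have hA : stepA (ans, S ++ RB) l = (ans - 1, S ++ RB) := by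
        simp only [stepA, if_neg hnomem1, if_neg hnomem2]
      have hB : stepB (ans, RB) l = (ans - 1, []) := by
        simp only [stepB]
        rw [hrcase]
      rw [hA, hB]
      have := hrec (ans - 1) []
        (by rw [List.append_nil, ← hassoc]; exact hsort)
        (by intro l' hl'
            rw [List.append_nil, ← hassoc]
            exact hnm l' (by simp [hl']))
      rw [List.append_nil, ← hassoc] at this
      exact this
    | cons v t' =>
      have hvge : ¬ (v < l - 1) := by
        simpa using dropWhile_head_not hrcase
      have hvne : v ≠ l := by
        intro h; subst h
        exact (hrcase ▸ hlnotr) List.mem_cons_self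
      have hrsort : (v :: t').Pairwise (· ≤ ·) := by
        have : (RB.dropWhile (fun v => decide (v < l - 1))).Pairwise (· ≤ ·) :=
          hsort.sublist (hrsub.trans (List.sublist_append_right S RB))
        rwa [hrcase] at this
      have hvle : ∀ y ∈ t', v ≤ y := (List.pairwise_cons.mp hrsort).1
      have hSDnot : ∀ x : Int, l - 1 ≤ x →
          x ∉ S ++ RB.takeWhile (fun v => decide (v < l - 1)) := by
        intro x hx hmem
        have := hSDsmall x hmem; omega
      rw [hrcase] at hassoc
      have hmem1 : (l - 1 ∈ S ++ RB) ↔ v = l - 1 := by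
        rw [hassoc]
        constructor
        · intro h
          rcases List.mem_append.mp h with h | h
          · exact absurd h (hSDnot _ (by omega))
          · rcases List.mem_cons.mp h with h | h
            · omega
            · have := hvle _ h; omega
        · intro h; subst h; simp
      have hB : stepB (ans, RB) l =
          (if v ≤ l + 1 then (ans, t') else (ans - 1, v :: t')) := by
        simp only [stepB]
        rw [hrcase]
      have hsub' : List.Sublist ((S ++ RB.takeWhile (fun v => decide (v < l - 1))) ++ t')
          (S ++ RB) := by
        rw [hassoc]
        exact (List.append_sublist_append_left _).mpr (List.sublist_cons_self v t')
      by_cases hv1 : v = l - 1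
      · -- A removes l-1 = head of the suffix; B matches it
        have h1 : l - 1 ∈ S ++ RB := hmem1.mpr hv1
        have herase : (S ++ RB).erase (l - 1) =
            (S ++ RB.takeWhile (fun v => decide (v < l - 1))) ++ t' := by
          rw [hassoc, List.erase_append_right _ (hSDnot _ (by omega)), hv1,
            List.erase_cons_head]
        have hA : stepA (ans, S ++ RB) l =
            (ans, (S ++ RB.takeWhile (fun v => decide (v < l - 1))) ++ t') := by
          simp only [stepA, if_pos h1,
            PySem.List.remove?_eq_some_erase _ _ h1, Option.getD_some, herase]
        rw [hA, hB, if_pos (by omega : v ≤ l + 1)]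
        refine hrec ans t' (hsort.sublist hsub') ?_
        intro l' hl' hmem
        exact hnm l' (by simp [hl']) (hsub'.mem hmem)
      · have hn1 : l - 1 ∉ S ++ RB := fun h => hv1 (hmem1.mp h)
        by_cases hv2 : v = l + 1
        · -- A removes l+1 = head of the suffix; B matches it
          have h2 : l + 1 ∈ S ++ RB := by rw [hassoc]; subst hv2; simp
          have herase : (S ++ RB).erase (l + 1) =
              (S ++ RB.takeWhile (fun v => decide (v < l - 1))) ++ t' := by
            rw [hassoc, List.erase_append_right _ (hSDnot _ (by omega)), hv2,
              List.erase_cons_head]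
          have hA : stepA (ans, S ++ RB) l =
              (ans, (S ++ RB.takeWhile (fun v => decide (v < l - 1))) ++ t') := by
            simp only [stepA, if_neg hn1, if_pos h2,
              PySem.List.remove?_eq_some_erase _ _ h2, Option.getD_some, herase]
          rw [hA, hB, if_pos (by omega : v ≤ l + 1)]
          refine hrec ans t' (hsort.sublist hsub') ?_
          intro l' hl' hmem
          exact hnm l' (by simp [hl']) (hsub'.mem hmem)
        · -- head > l+1: no usable spare; both sides decrement
          have hn2 : l + 1 ∉ S ++ RB := by
            intro h
            rw [hassoc] at h
            rcases List.mem_append.mp h with h | h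
            · exact hSDnot _ (by omega) h
            · rcases List.mem_cons.mp h with h | h
              · omega
              · have := hvle _ h; omega
          have hA : stepA (ans, S ++ RB) l = (ans - 1, S ++ RB) := by
            simp only [stepA, if_neg hn1, if_neg hn2]
          rw [hA, hB, if_neg (by omega : ¬ v ≤ l + 1)]
          have := hrec (ans - 1) (v :: t')
            (by rw [← hassoc]; exact hsort)
            (by intro l' hl' hmem
                refine hnm l' (by simp [hl']) ?_
                rw [hassoc]; exact hmem)
          rw [← hassoc] at this
          exact this

-- ===== VERDICT (by name: the statement is the Claim_ definition above) =====
theorem solution_spec : Claim_equal_solution := by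
  intro n lost reserve _
  show solution n lost reserve = solution_alt n lost reserve
  unfold solution solution_alt
  dsimp only
  have hf1 : lost.filter (fun x => !(x ∈ PySem.Set.ofList reserve : Bool))
      = lost.filter (fun i => !reserve.contains i) := by
    apply List.filter_congr; intro x _; simp [PySem.Set.mem_ofList]
  have hf2 : reserve.filter (fun x => !(x ∈ PySem.Set.ofList lost : Bool))
      = reserve.filter (fun i => !lost.contains i) := by
    apply List.filter_congr; intro x _; simp [PySem.Set.mem_ofList]
  rw [hf1, hf2]
  have h := loop_eq
    (PySem.List.sorted (lost.filter (fun i => !reserve.contains i)) (fun x => x) false)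
    n []
    (PySem.List.sorted (reserve.filter (fun i => !lost.contains i)) (fun x => x) false)
    (by simpa using PySem.List.sorted_pairwise (xs := reserve.filter (fun i => !lost.contains i)) (key := fun x => x))
    (by simp)
    (PySem.List.sorted_pairwise (xs := lost.filter (fun i => !reserve.contains i)) (key := fun x => x))
    (by
      intro l hl hmem
      rw [List.nil_append] at hmem
      rw [PySem.List.mem_sorted] at hl hmem
      have h1 : l ∈ lost := (List.mem_filter.mp hl).1
      have h2 := (List.mem_filter.mp hmem).2
      simp at h2
      exact h2 h1)
  rw [List.nil_append] at h
  exact h
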